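-- pv_equiv track=rewrite | github.com/MoAI-PL/BHL25 | green_code_V1.0/build/resources/main/scripts/ecocode_analyzer.py | get_eco_score
-- ===== SOURCE A (Python) =====
-- def get_eco_score(issues):
--     """
--     Calculate an eco score based on the issues found.
--     Score from 0-100, where 100 is best (no issues).
--     """
--     if not issues:
--         return 100
--
--     score = 100
--
--     for issue in issues:
--         severity = issue.get('severity', 'info')
--         impact = issue.get('co2_impact', 'low')
--
--         # Deduct points based on severity and impact
--         if severity == 'error':
--             score -= 15
--         elif severity == 'warning':
--             score -= 8
--         else:
--             score -= 3
--
--         # Additional deduction for high impact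
--         if impact == 'high':
--             score -= 5
--         elif impact == 'medium':
--             score -= 2
--
--     return max(0, score)
-- ===== SOURCE B (Python) =====
-- def get_eco_score(issues):
--     """
--     Calculate an eco score based on the issues found.
--     Score from 0-100, where 100 is best (no issues).
--     """
--     if not issues:
--         return 100
--     sevs = [issue.get('severity', 'info') for issue in issues]
--     imps = [issue.get('co2_impact', 'low') for issue in issues]
--     e = sevs.count('error')
--     w = sevs.count('warning')
--     h = imps.count('high')
--     m = imps.count('medium')
--     score = 100 - 15 * e - 8 * w - 3 * (len(issues) - e - w) - 5 * h - 2 * m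
--     return max(0, score)
-- ===== Notes on version B (the rewrite author's own statement) =====
-- stated objective: alternative
-- what changed: Replaces the per-issue if/elif deduction loop by tallying category counts (error/warning, high/medium) with list.count over the projected severity/impact lists and computing the score in one closed-form expression.
import Mathlib
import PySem

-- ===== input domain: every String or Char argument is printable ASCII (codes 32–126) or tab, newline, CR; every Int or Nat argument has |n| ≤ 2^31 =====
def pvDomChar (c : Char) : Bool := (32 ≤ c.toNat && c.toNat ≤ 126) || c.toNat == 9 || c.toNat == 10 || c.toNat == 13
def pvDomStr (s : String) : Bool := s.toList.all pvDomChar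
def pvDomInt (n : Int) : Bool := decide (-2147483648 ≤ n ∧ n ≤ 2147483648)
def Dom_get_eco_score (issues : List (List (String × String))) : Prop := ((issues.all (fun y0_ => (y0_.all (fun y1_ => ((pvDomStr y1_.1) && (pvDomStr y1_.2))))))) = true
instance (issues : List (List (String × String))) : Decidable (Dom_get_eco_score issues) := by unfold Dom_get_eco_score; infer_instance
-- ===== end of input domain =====

-- B replaces A's per-issue if/elif deduction loop with category counts and one closed-form score (alternative decomposition, same cost).

-- ===== PORT A =====
def get_eco_score (issues : List (List (String × String))) : Int :=
  if issues = [] then 100 else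
  let score : Int := issues.foldl (fun score issue =>
    let severity := PySem.Dict.getD (PySem.Dict.mk issue) "severity" "info"
    let impact := PySem.Dict.getD (PySem.Dict.mk issue) "co2_impact" "low"
    let score := if severity = "error" then score - 15
      else if severity = "warning" then score - 8
      else score - 3
    if impact = "high" then score - 5
    else if impact = "medium" then score - 2
    else score) 100
  max 0 score

-- ===== PORT B =====
def get_eco_score_alt (issues : List (List (String × String))) : Int :=
  if issues = [] then 100 else
  let sevs := issues.map (fun issue => PySem.Dict.getD (PySem.Dict.mk issue) "severity" "info")
  let imps := issues.map (fun issue => PySem.Dict.getD (PySem.Dict.mk issue) "co2_impact" "low")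
  let e : Int := PySem.List.count sevs "error"
  let w : Int := PySem.List.count sevs "warning"
  let h : Int := PySem.List.count imps "high"
  let m : Int := PySem.List.count imps "medium"
  let score := 100 - 15 * e - 8 * w - 3 * (PySem.List.len issues - e - w) - 5 * h - 2 * m
  max 0 score

-- ===== PRECONDITION & SPEC =====
def Spec_get_eco_score (issues : List (List (String × String))) (out : Int) : Prop := out = get_eco_score_alt issues
instance (issues : List (List (String × String))) (out : Int) : Decidable (Spec_get_eco_score issues out) := by unfold Spec_get_eco_score; infer_instance

-- ===== CLAIM (what is proved, stated in full; the proofs are below) =====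
def Claim_equal_get_eco_score : Prop := ∀ (issues : List (List (String × String))), Dom_get_eco_score issues → Spec_get_eco_score issues (get_eco_score issues)

-- ===== LEMMAS AND PROOFS =====

-- per-issue deduction for the severity field
def pvSevD (sv : String) : Int := if sv = "error" then -15 else if sv = "warning" then -8 else -3
-- per-issue deduction for the impact field
def pvImpD (im : String) : Int := if im = "high" then -5 else if im = "medium" then -2 else 0

def pvSev (issue : List (String × String)) : String := PySem.Dict.getD (PySem.Dict.mk issue) "severity" "info"
def pvImp (issue : List (String × String)) : String := PySem.Dict.getD (PySem.Dict.mk issue) "co2_impact" "low"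

-- A's loop body adds pvSevD + pvImpD of the issue's fields
theorem pv_foldl_eq_sum (l : List (List (String × String))) : ∀ (s : Int),
    l.foldl (fun score issue =>
      let severity := PySem.Dict.getD (PySem.Dict.mk issue) "severity" "info"
      let impact := PySem.Dict.getD (PySem.Dict.mk issue) "co2_impact" "low"
      let score := if severity = "error" then score - 15
        else if severity = "warning" then score - 8
        else score - 3
      if impact = "high" then score - 5
      else if impact = "medium" then score - 2
      else score) s
    = s + (l.map (fun issue => pvSevD (pvSev issue) + pvImpD (pvImp issue))).sum := by
  induction l with
  | nil => intro s; simp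
  | cons x xs ih =>
    intro s
    simp only [List.foldl_cons, List.map_cons, List.sum_cons, ih]
    unfold pvSevD pvImpD pvSev pvImp
    split_ifs <;> ring

theorem pv_sev_sum (ss : List String) :
    (ss.map pvSevD).sum
      = -15 * (ss.count "error" : Int) - 8 * (ss.count "warning" : Int)
        - 3 * ((ss.length : Int) - (ss.count "error" : Int) - (ss.count "warning" : Int)) := by
  induction ss with
  | nil => simp
  | cons x xs ih =>
    simp only [List.map_cons, List.sum_cons, ih, List.count_cons, List.length_cons]
    unfold pvSevD
    by_cases hx : x = "error" <;> by_cases hy : x = "warning" <;>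
      simp [hx, hy] <;> ring

theorem pv_imp_sum (ss : List String) :
    (ss.map pvImpD).sum = -5 * (ss.count "high" : Int) - 2 * (ss.count "medium" : Int) := by
  induction ss with
  | nil => simp
  | cons x xs ih =>
    simp only [List.map_cons, List.sum_cons, ih, List.count_cons]
    unfold pvImpD
    by_cases hx : x = "high" <;> by_cases hy : x = "medium" <;>
      simp [hx, hy] <;> ring

-- ===== VERDICT (by name: the statement is the Claim_ definition above) =====
theorem get_eco_score_spec : Claim_equal_get_eco_score := by
  intro issues _
  unfold Spec_get_eco_score get_eco_score get_eco_score_alt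
  by_cases h : issues = []
  · simp [h]
  · simp only [h, if_false]
    rw [pv_foldl_eq_sum]
    rw [PySem.List.sum_map_add_int]
    have hsev : (issues.map fun issue => pvSevD (pvSev issue)).sum
        = ((issues.map (fun issue => PySem.Dict.getD (PySem.Dict.mk issue) "severity" "info")).map pvSevD).sum := by
      rw [List.map_map]; rfl
    have himp : (issues.map fun issue => pvImpD (pvImp issue)).sum
        = ((issues.map (fun issue => PySem.Dict.getD (PySem.Dict.mk issue) "co2_impact" "low")).map pvImpD).sum := by
      rw [List.map_map]; rfl
    rw [hsev, himp, pv_sev_sum, pv_imp_sum]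
    simp only [PySem.List.count_eq, PySem.List.len_eq, List.length_map]
    ring_nf
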